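-- pv_equiv track=rewrite | github.com/visual-trials/X16-Hardware-Tests | fx_tests/textures/ColorWheel/color_wheel.py | get_max_and_min_y_for_polygon
-- ===== SOURCE A (Python) =====
-- def get_max_and_min_y_for_polygon(diamond_polygon):
--
--     min_y = None
--     max_y = None
--
--     for point in diamond_polygon:
--         if min_y is None or point[1] < min_y:
--             min_y = point[1]
--         if max_y is None or point[1] > max_y:
--             max_y = point[1]
--
--     return (min_y, max_y)
-- ===== SOURCE B (Python) =====
-- def get_max_and_min_y_for_polygon(diamond_polygon):
--     ys = sorted(point[1] for point in diamond_polygon)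
--     return (ys[0], ys[-1])
-- ===== Notes on version B (the rewrite author's own statement) =====
-- stated objective: alternative
-- what changed: Replaces the fused min/max accumulator loop over None sentinels by sorting the y-coordinates once and reading the first and last element of the sorted list.
-- outside the precondition, e.g. on get_max_and_min_y_for_polygon([]): A returns (None, None), B raises IndexError
import Mathlib
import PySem

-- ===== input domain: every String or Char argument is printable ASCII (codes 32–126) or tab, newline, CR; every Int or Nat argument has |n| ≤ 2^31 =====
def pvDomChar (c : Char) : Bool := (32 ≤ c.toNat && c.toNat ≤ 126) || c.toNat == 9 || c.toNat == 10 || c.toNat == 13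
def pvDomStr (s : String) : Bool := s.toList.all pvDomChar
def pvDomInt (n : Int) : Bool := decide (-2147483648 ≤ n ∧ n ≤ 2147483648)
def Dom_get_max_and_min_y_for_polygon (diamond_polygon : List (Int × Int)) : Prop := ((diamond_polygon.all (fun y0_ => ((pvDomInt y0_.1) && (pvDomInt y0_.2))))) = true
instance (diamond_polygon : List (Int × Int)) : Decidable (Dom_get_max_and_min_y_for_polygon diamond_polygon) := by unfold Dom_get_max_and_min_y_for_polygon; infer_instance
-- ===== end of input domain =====

-- B sorts the y-coordinates once and reads the ends of the sorted list, instead of A's fused min/max accumulator loop with None sentinels (alternative algorithm); Pre_ excludes the empty polygon, where A returns (None, None) (not an Int pair) and B raises IndexError.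


-- ===== PORT A =====
-- body of A's for-loop: both `if` updates on the (min_y, max_y) state
def pvStepA (st : Option Int × Option Int) (point : Int × Int) : Option Int × Option Int :=
  let min_y := match st.1 with
    | none => some point.2
    | some m => if point.2 < m then some point.2 else some m
  let max_y := match st.2 with
    | none => some point.2
    | some m => if point.2 > m then some point.2 else some m
  (min_y, max_y)

def get_max_and_min_y_for_polygon (diamond_polygon : List (Int × Int)) : Int × Int :=
  let st := diamond_polygon.foldl pvStepA (none, none)
  -- Pre_ guarantees a nonempty polygon, so both accumulators are `some`; `.getD 0` only extracts
  (st.1.getD 0, st.2.getD 0)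

-- ===== PORT B =====
def get_max_and_min_y_for_polygon_alt (diamond_polygon : List (Int × Int)) : Int × Int :=
  let ys := PySem.List.sorted (diamond_polygon.map (fun point => point.2)) (fun y => y) false
  -- Pre_ guarantees ys ≠ [], so ys[0] and ys[-1] are `some`; `.getD 0` only extracts
  ((PySem.List.pyGet? ys 0).getD 0, (PySem.List.pyGet? ys (-1)).getD 0)

-- ===== PRECONDITION & SPEC =====
-- Pre_ excludes only the empty polygon: there A returns (None, None), which is not an Int pair, and B raises IndexError.
def Pre_get_max_and_min_y_for_polygon (diamond_polygon : List (Int × Int)) : Prop := diamond_polygon.isEmpty = false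
instance (diamond_polygon : List (Int × Int)) : Decidable (Pre_get_max_and_min_y_for_polygon diamond_polygon) := by unfold Pre_get_max_and_min_y_for_polygon; infer_instance
def pvWitness_get_max_and_min_y_for_polygon : (List (Int × Int)) := [(0, 3), (2, -1), (5, 7)]
def Spec_get_max_and_min_y_for_polygon (diamond_polygon : List (Int × Int)) (out : Int × Int) : Prop := out = get_max_and_min_y_for_polygon_alt diamond_polygon
instance (diamond_polygon : List (Int × Int)) (out : Int × Int) : Decidable (Spec_get_max_and_min_y_for_polygon diamond_polygon out) := by unfold Spec_get_max_and_min_y_for_polygon; infer_instance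

-- ===== CLAIM (what is proved, stated in full; the proofs are below) =====
def Claim_equal_get_max_and_min_y_for_polygon : Prop := ∀ (diamond_polygon : List (Int × Int)), Dom_get_max_and_min_y_for_polygon diamond_polygon → Pre_get_max_and_min_y_for_polygon diamond_polygon → Spec_get_max_and_min_y_for_polygon diamond_polygon (get_max_and_min_y_for_polygon diamond_polygon)

-- ===== LEMMAS AND PROOFS =====
-- once both accumulators are `some`, A's loop computes the running min and max of the y's
lemma pvStepA_some (a b : Int) (x : Int × Int) :
    pvStepA (some a, some b) x = (some (min a x.2), some (max b x.2)) := by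
  simp only [pvStepA, min_def, max_def]
  split_ifs <;> simp_all <;> omega

lemma pvLoopA (l : List (Int × Int)) (a b : Int) :
    l.foldl pvStepA (some a, some b)
      = (some ((l.map (fun p => p.2)).foldl min a), some ((l.map (fun p => p.2)).foldl max b)) := by
  induction l generalizing a b with
  | nil => simp
  | cons x t ih =>
      simp only [List.foldl_cons, List.map_cons, pvStepA_some, ih]

-- in a ≤-pairwise list, the last element is an upper bound
lemma pvLe_getLast_of_pairwise (s : List Int) (hs : s.Pairwise (· ≤ ·)) (m : Int)
    (hm : s.getLast? = some m) : ∀ x ∈ s, x ≤ m := by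
  induction s with
  | nil => simp
  | cons a t ih =>
      intro x hx
      cases t with
      | nil =>
          simp only [List.getLast?_singleton, Option.some.injEq] at hm
          simp only [List.mem_singleton] at hx
          omega
      | cons b u =>
          have hm' : (b :: u).getLast? = some m := by
            simpa [List.getLast?_cons_cons] using hm
          rcases List.mem_cons.1 hx with h | h
          · subst h
            exact List.rel_of_pairwise_cons hs (List.mem_of_getLast? hm')
          · exact ih hs.of_cons hm' x h

-- ===== VERDICT (by name: the statement is the Claim_ definition above) =====
theorem get_max_and_min_y_for_polygon_spec : Claim_equal_get_max_and_min_y_for_polygon := by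
  intro l _ hpre
  unfold Spec_get_max_and_min_y_for_polygon get_max_and_min_y_for_polygon get_max_and_min_y_for_polygon_alt
  cases l with
  | nil => exact Bool.noConfusion hpre
  | cons x t =>
      simp only [List.foldl_cons, List.map_cons]
      have h0 : pvStepA (none, none) x = (some x.2, some x.2) := rfl
      rw [h0, pvLoopA]
      set ys : List Int := x.2 :: t.map (fun p => p.2) with hys
      set s : List Int := PySem.List.sorted ys (fun y => y) false with hsdef
      have hperm : s.Perm ys := PySem.List.sorted_perm ys (fun y => y) false
      have hsne : s ≠ [] := by
        intro h
        have := hperm.length_eq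
        simp [h, hys] at this
      obtain ⟨m, u, hmu⟩ := List.exists_cons_of_ne_nil hsne
      -- min side
      have hminmem : (t.map (fun p => p.2)).foldl min x.2 ∈ ys := by
        rcases PySem.List.foldl_min_mem (t.map (fun p => p.2)) x.2 with h | h
        · simp [hys, h]
        · simp [hys, h]
      have hminle : ∀ y ∈ ys, (t.map (fun p => p.2)).foldl min x.2 ≤ y := by
        intro y hy
        rcases List.mem_cons.1 (hys ▸ hy) with h | h
        · rw [h]; exact (PySem.List.foldl_min_le (t.map (fun p => p.2)) x.2).1
        · exact (PySem.List.foldl_min_le (t.map (fun p => p.2)) x.2).2 y h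
      have hhdle : ∀ y ∈ ys, m ≤ y := PySem.List.key_head_sorted_le (xs := ys) (fun y => y) (by rw [← hsdef, hmu])
      have hmmem : m ∈ ys := (PySem.List.mem_sorted ys (fun y => y) false m).1 (hsdef ▸ hmu ▸ List.mem_cons_self)
      have hmin : m = (t.map (fun p => p.2)).foldl min x.2 :=
        le_antisymm (hhdle _ hminmem) (hminle _ hmmem)
      -- max side
      have hmaxmem : (t.map (fun p => p.2)).foldl max x.2 ∈ ys := by
        rcases PySem.List.foldl_max_mem (t.map (fun p => p.2)) x.2 with h | h
        · simp [hys, h]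
        · simp [hys, h]
      have hmaxge : ∀ y ∈ ys, y ≤ (t.map (fun p => p.2)).foldl max x.2 := by
        intro y hy
        rcases List.mem_cons.1 (hys ▸ hy) with h | h
        · rw [h]; exact (PySem.List.le_foldl_max (t.map (fun p => p.2)) x.2).1
        · exact (PySem.List.le_foldl_max (t.map (fun p => p.2)) x.2).2 y h
      obtain ⟨lastv, hlast⟩ : ∃ v, s.getLast? = some v := by
        cases hs : s.getLast? with
        | none => exact absurd (List.getLast?_eq_none_iff.1 hs) hsne
        | some v => exact ⟨v, rfl⟩
      have hpw : s.Pairwise (· ≤ ·) := by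
        have := PySem.List.sorted_pairwise (xs := ys) (key := fun y => y)
        simpa [hsdef] using this
      have hlastub : ∀ y ∈ ys, y ≤ lastv := fun y hy =>
        pvLe_getLast_of_pairwise s hpw lastv hlast y (hperm.mem_iff.2 hy)
      have hlastmem : lastv ∈ ys := hperm.mem_iff.1 (List.mem_of_getLast? hlast)
      have hmax : lastv = (t.map (fun p => p.2)).foldl max x.2 :=
        le_antisymm (hmaxge _ hlastmem) (hlastub _ hmaxmem)
      rw [PySem.List.pyGet?_neg_one, hlast, hmu]
      simp [← hmin, ← hmax]
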